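-- pv_equiv track=rewrite | github.com/KevenGe/LeetCode-Solutions | problemset/1818. 绝对差值和/solution.py | minAbsoluteSumDiff
-- ===== SOURCE A (Python) =====
-- from typing import List
-- import bisect
--
-- def minAbsoluteSumDiff(nums1: List[int], nums2: List[int]) -> int:
--     ans = 0
--     nums1s = sorted(nums1)
--
--     maxn = 0
--     for i in range(len(nums1)):
--         diff = abs(nums1[i] - nums2[i])
--         ans += diff
--
--         j = bisect.bisect_left(nums1s, nums2[i])
--         if j < len(nums1s):
--             maxn = max(maxn, diff - abs(nums1s[j] - nums2[i]))
--
--         if j - 1 >= 0: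
--             maxn = max(maxn, diff - abs(nums1s[j - 1] - nums2[i]))
--
--     return (ans - maxn + 1000000007) % 1000000007
-- ===== SOURCE B (Python) =====
-- from typing import List
--
-- def minAbsoluteSumDiff(nums1: List[int], nums2: List[int]) -> int:
--     ans = 0
--     gain = 0
--     for x, y in zip(nums1, nums2):
--         diff = abs(x - y)
--         ans += diff
--         best = diff
--         for z in nums1:
--             best = min(best, abs(z - y))
--         gain = max(gain, diff - best)
--     return (ans - gain + 1000000007) % 1000000007
-- ===== Notes on version B (the rewrite author's own statement) =====
-- stated objective: simpler
-- what changed: B drops the sort + bisect machinery entirely: it pairs the lists with zip and finds each position's best replacement by a plain linear scan of nums1 (seeded with the position's own diff), a shorter and plainer O(n^2) formulation of the same answer.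
import Mathlib
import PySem

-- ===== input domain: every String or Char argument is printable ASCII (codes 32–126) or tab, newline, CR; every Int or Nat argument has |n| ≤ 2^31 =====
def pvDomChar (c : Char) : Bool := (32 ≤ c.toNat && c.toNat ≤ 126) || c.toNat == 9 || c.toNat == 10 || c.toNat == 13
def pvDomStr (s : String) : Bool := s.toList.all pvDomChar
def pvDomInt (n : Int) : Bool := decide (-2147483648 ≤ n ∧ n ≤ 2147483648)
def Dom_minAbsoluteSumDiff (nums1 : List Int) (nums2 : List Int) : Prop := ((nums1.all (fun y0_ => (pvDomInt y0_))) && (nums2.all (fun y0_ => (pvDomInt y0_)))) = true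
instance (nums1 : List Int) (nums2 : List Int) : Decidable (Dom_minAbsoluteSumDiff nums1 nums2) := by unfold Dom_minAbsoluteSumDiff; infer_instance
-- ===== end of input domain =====

-- ===== PORT A =====
-- B replaces A's sort+bisect with a zip over the pairs and a plain linear scan of
-- nums1 for each position's best replacement: simpler, same return value.
def minAbsoluteSumDiff (nums1 : List Int) (nums2 : List Int) : Int :=
  let nums1s := PySem.List.sorted nums1 (fun x => x) false
  let st := (PySem.List.pyRange 0 (nums1.length : Int) 1).foldl
    (fun (st : Int × Int) i =>
      let diff := |PySem.List.pyGetD nums1 i 0 - PySem.List.pyGetD nums2 i 0|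
      let ans := st.1 + diff
      let j := PySem.List.bisectLeft nums1s (PySem.List.pyGetD nums2 i 0)
      let maxn := if j < nums1s.length then
          max st.2 (diff - |PySem.List.pyGetD nums1s (j : Int) 0 - PySem.List.pyGetD nums2 i 0|)
        else st.2
      let maxn := if 1 ≤ j then
          max maxn (diff - |PySem.List.pyGetD nums1s ((j : Int) - 1) 0 - PySem.List.pyGetD nums2 i 0|)
        else maxn
      (ans, maxn))
    ((0 : Int), (0 : Int))
  PySem.Int.mod (st.1 - st.2 + 1000000007) 1000000007

-- ===== PORT B =====
def minAbsoluteSumDiff_alt (nums1 : List Int) (nums2 : List Int) : Int :=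
  let st := (nums1.zip nums2).foldl
    (fun (st : Int × Int) p =>
      let diff := |p.1 - p.2|
      let best := nums1.foldl (fun b z => min b |z - p.2|) diff
      (st.1 + diff, max st.2 (diff - best)))
    ((0 : Int), (0 : Int))
  PySem.Int.mod (st.1 - st.2 + 1000000007) 1000000007

-- ===== PRECONDITION & SPEC =====
-- A indexes nums2 by every index of nums1, so it raises IndexError when nums1 is longer.
def Pre_minAbsoluteSumDiff (nums1 : List Int) (nums2 : List Int) : Prop :=
  nums1.length ≤ nums2.length
instance (nums1 : List Int) (nums2 : List Int) : Decidable (Pre_minAbsoluteSumDiff nums1 nums2) := by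
  unfold Pre_minAbsoluteSumDiff; infer_instance

def pvWitness_minAbsoluteSumDiff : List Int × List Int := ([1, -2, 4], [0, 3, 4])

def Spec_minAbsoluteSumDiff (nums1 : List Int) (nums2 : List Int) (out : Int) : Prop := out = minAbsoluteSumDiff_alt nums1 nums2
instance (nums1 : List Int) (nums2 : List Int) (out : Int) : Decidable (Spec_minAbsoluteSumDiff nums1 nums2 out) := by unfold Spec_minAbsoluteSumDiff; infer_instance

-- ===== CLAIM (what is proved, stated in full; the proofs are below) =====
def Claim_equal_minAbsoluteSumDiff : Prop := ∀ (nums1 : List Int) (nums2 : List Int), Dom_minAbsoluteSumDiff nums1 nums2 → Pre_minAbsoluteSumDiff nums1 nums2 → Spec_minAbsoluteSumDiff nums1 nums2 (minAbsoluteSumDiff nums1 nums2)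

-- ===== LEMMAS AND PROOFS =====

-- The inner scan of B computes the minimum of |z - y| over nums1 (its seed |x - y| is
-- itself one of the scanned values when x ∈ nums1).
theorem minScan_spec (n1 : List Int) (x y : Int) (hx : x ∈ n1) :
    (∀ z ∈ n1, n1.foldl (fun b z => min b |z - y|) |x - y| ≤ |z - y|) ∧
      (∃ z ∈ n1, n1.foldl (fun b z => min b |z - y|) |x - y| = |z - y|) := by
  have hmap : n1.foldl (fun b z => min b |z - y|) |x - y|
      = (n1.map (fun z => |z - y|)).foldl min |x - y| := by
    rw [List.foldl_map]
  constructor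
  · intro z hz
    rw [hmap]
    exact (PySem.List.foldl_min_le _ _).2 _ (List.mem_map_of_mem hz)
  · rcases PySem.List.foldl_min_mem (n1.map (fun z => |z - y|)) |x - y| with h | h
    · exact ⟨x, hx, by rw [hmap, h]⟩
    · rw [List.mem_map] at h
      rcases h with ⟨z, hz, hzeq⟩
      exact ⟨z, hz, by rw [hmap, hzeq]⟩

-- A's per-position maxn update (two bisect neighbours) equals B's (linear-scan best).
theorem step_eq (n1 : List Int) (x y maxn : Int) (hx : x ∈ n1) :
    (let s := PySem.List.sorted n1 (fun v => v) false
     let diff := |x - y|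
     let j := PySem.List.bisectLeft s y
     let m1 := if j < s.length then max maxn (diff - |PySem.List.pyGetD s (j : Int) 0 - y|) else maxn
     if 1 ≤ j then max m1 (diff - |PySem.List.pyGetD s ((j : Int) - 1) 0 - y|) else m1)
    = max maxn (|x - y| - n1.foldl (fun b z => min b |z - y|) |x - y|) := by
  set s := PySem.List.sorted n1 (fun v => v) false with hs
  set j := PySem.List.bisectLeft s y with hj
  set M := n1.foldl (fun b z => min b |z - y|) |x - y| with hM
  have hperm : s.Perm n1 := PySem.List.sorted_perm n1 (fun v => v) false
  have hpair : s.Pairwise (fun a b => a ≤ b) := PySem.List.sorted_pairwise n1 (fun v => v)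
  have hxs : x ∈ s := hperm.mem_iff.mpr hx
  have hlen : 1 ≤ s.length := List.length_pos_of_mem hxs
  obtain ⟨hjle, hlow, hupp⟩ := PySem.List.bisectLeft_spec s y hpair
  obtain ⟨hMle, w, hw, hweq⟩ := minScan_spec n1 x y hx
  -- the witness as an element of the sorted list
  have hws : w ∈ s := hperm.mem_iff.mpr hw
  obtain ⟨k, hk, hkeq⟩ := List.getElem_of_mem hws
  -- every available bisect candidate is ≥ M
  have hcand : ∀ (p : Nat) (hp : p < s.length), M ≤ |s[p] - y| := by
    intro p hp
    exact hMle _ (hperm.mem_iff.mp (List.getElem_mem hp))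
  -- and some available candidate is ≤ M
  simp only
  by_cases h1 : j < s.length <;> by_cases h2 : 1 ≤ j
  · -- both candidates available
    have hc1M : M ≤ |s[j] - y| := hcand j h1
    have hjm : j - 1 < s.length := by omega
    have hc2M : M ≤ |s[j-1] - y| := hcand (j-1) hjm
    have hg1 : PySem.List.pyGetD s (j : Int) 0 = s[j] := by
      rw [PySem.List.pyGetD_natCast]; exact List.getD_eq_getElem _ _ h1
    have hg2 : PySem.List.pyGetD s ((j : Int) - 1) 0 = s[j-1] := by
      have : ((j : Int) - 1) = ((j - 1 : Nat) : Int) := by omega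
      rw [this, PySem.List.pyGetD_natCast]; exact List.getD_eq_getElem _ _ hjm
    have hone : |s[j] - y| ≤ M ∨ |s[j-1] - y| ≤ M := by
      by_cases hkj : j ≤ k
      · left
        have hyj : y ≤ s[j] := hupp j h1 (le_refl j)
        have hmono : s[j] ≤ s[k] := PySem.List.sorted_id_getElem_mono n1 hkj hk
        have habs : s[k] - y ≤ |s[k] - y| := le_abs_self _
        have : |s[j] - y| = s[j] - y := abs_of_nonneg (by omega)
        rw [← hkeq] at hweq
        omega
      · right
        have hkj' : k ≤ j - 1 := by omega
        have hky : s[k] < y := hlow k hk (by omega)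
        have hmono : s[k] ≤ s[j-1] := PySem.List.sorted_id_getElem_mono n1 hkj' hjm
        have hjy : s[j-1] < y := hlow (j-1) hjm (by omega)
        have habs : -(s[k] - y) ≤ |s[k] - y| := neg_le_abs _
        have : |s[j-1] - y| = -(s[j-1] - y) := abs_of_nonpos (by omega)
        rw [← hkeq] at hweq
        omega
    rw [hg1, hg2]
    omega
  · -- j = 0 < length: only the right candidate
    have hc1M : M ≤ |s[j] - y| := hcand j h1
    have hg1 : PySem.List.pyGetD s (j : Int) 0 = s[j] := by
      rw [PySem.List.pyGetD_natCast]; exact List.getD_eq_getElem _ _ h1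
    have hc1 : |s[j] - y| ≤ M := by
      have hyj : y ≤ s[j] := hupp j h1 (by omega)
      have hmono : s[j] ≤ s[k] := PySem.List.sorted_id_getElem_mono n1 (by omega) hk
      have habs : s[k] - y ≤ |s[k] - y| := le_abs_self _
      have : |s[j] - y| = s[j] - y := abs_of_nonneg (by omega)
      rw [← hkeq] at hweq
      omega
    rw [hg1]
    omega
  · -- j = length ≥ 1: only the left candidate
    have hjm : j - 1 < s.length := by omega
    have hc2M : M ≤ |s[j-1] - y| := hcand (j-1) hjm
    have hg2 : PySem.List.pyGetD s ((j : Int) - 1) 0 = s[j-1] := by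
      have : ((j : Int) - 1) = ((j - 1 : Nat) : Int) := by omega
      rw [this, PySem.List.pyGetD_natCast]; exact List.getD_eq_getElem _ _ hjm
    have hc2 : |s[j-1] - y| ≤ M := by
      have hky : s[k] < y := hlow k hk (by omega)
      have hmono : s[k] ≤ s[j-1] := PySem.List.sorted_id_getElem_mono n1 (by omega) hjm
      have hjy : s[j-1] < y := hlow (j-1) hjm (by omega)
      have habs : -(s[k] - y) ≤ |s[k] - y| := neg_le_abs _
      have : |s[j-1] - y| = -(s[j-1] - y) := abs_of_nonpos (by omega)
      rw [← hkeq] at hweq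
      omega
    rw [hg2]
    omega
  · omega

-- An indexed fold over range(len(xs)) reading xs[i] and ys[i] is the fold over zip(xs, ys).
theorem range_fold_eq_zip {β : Type} (xs : List Int) :
    ∀ (ys : List Int) (f : β → Int → Int → β) (init : β), xs.length ≤ ys.length →
    (List.range xs.length).foldl (fun acc k => f acc (xs.getD k 0) (ys.getD k 0)) init
      = (xs.zip ys).foldl (fun acc p => f acc p.1 p.2) init := by
  induction xs with
  | nil => intro ys f init h; simp
  | cons x xt ih =>
    intro ys f init h
    cases ys with
    | nil => simp at h
    | cons y yt =>
      simp only [List.length_cons, List.range_succ_eq_map, List.foldl_cons, List.foldl_map,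
        List.getD_cons_zero, List.getD_cons_succ, List.zip_cons_cons, Nat.succ_eq_add_one]
      exact ih yt f (f init x y) (by simpa using h)

-- A's pyRange/pyGetD loop over both lists, as a fold over zip(nums1, nums2).
theorem pyrange_fold_eq_zip {β : Type} (xs ys : List Int) (f : β → Int → Int → β) (init : β)
    (h : xs.length ≤ ys.length) :
    (PySem.List.pyRange 0 (xs.length : Int) 1).foldl
        (fun acc i => f acc (PySem.List.pyGetD xs i 0) (PySem.List.pyGetD ys i 0)) init
      = (xs.zip ys).foldl (fun acc p => f acc p.1 p.2) init := by
  rw [PySem.List.pyRange_zero_natCast, List.foldl_map]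
  simp only [PySem.List.pyGetD_natCast]
  exact range_fold_eq_zip xs ys f init h

-- ===== VERDICT (by name: the statement is the Claim_ definition above) =====
theorem minAbsoluteSumDiff_spec : Claim_equal_minAbsoluteSumDiff := by
  intro nums1 nums2 _ hpre
  unfold Spec_minAbsoluteSumDiff minAbsoluteSumDiff minAbsoluteSumDiff_alt
  have hb := pyrange_fold_eq_zip (β := Int × Int) nums1 nums2
    (fun st a b =>
      let diff := |a - b|
      let ans := st.1 + diff
      let j := PySem.List.bisectLeft (PySem.List.sorted nums1 (fun x => x) false) b
      let maxn := if j < (PySem.List.sorted nums1 (fun x => x) false).length then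
          max st.2 (diff - |PySem.List.pyGetD (PySem.List.sorted nums1 (fun x => x) false) (j : Int) 0 - b|)
        else st.2
      let maxn := if 1 ≤ j then
          max maxn (diff - |PySem.List.pyGetD (PySem.List.sorted nums1 (fun x => x) false) ((j : Int) - 1) 0 - b|)
        else maxn
      (ans, maxn))
    ((0 : Int), (0 : Int)) hpre
  simp only at hb ⊢
  rw [hb]
  have hcongr : (nums1.zip nums2).foldl
      (fun (st : Int × Int) (p : Int × Int) =>
        let diff := |p.1 - p.2|
        let ans := st.1 + diff
        let j := PySem.List.bisectLeft (PySem.List.sorted nums1 (fun x => x) false) p.2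
        let maxn := if j < (PySem.List.sorted nums1 (fun x => x) false).length then
            max st.2 (diff - |PySem.List.pyGetD (PySem.List.sorted nums1 (fun x => x) false) (j : Int) 0 - p.2|)
          else st.2
        let maxn := if 1 ≤ j then
            max maxn (diff - |PySem.List.pyGetD (PySem.List.sorted nums1 (fun x => x) false) ((j : Int) - 1) 0 - p.2|)
          else maxn
        (ans, maxn)) ((0 : Int), (0 : Int))
      = (nums1.zip nums2).foldl
      (fun (st : Int × Int) (p : Int × Int) =>
        let diff := |p.1 - p.2|
        let best := nums1.foldl (fun b z => min b |z - p.2|) diff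
        (st.1 + diff, max st.2 (diff - best))) ((0 : Int), (0 : Int)) := by
    apply PySem.List.foldl_congr_mem
    intro acc p hp
    obtain ⟨a, b⟩ := p
    have hx : a ∈ nums1 := (List.of_mem_zip hp).1
    have := step_eq nums1 a b acc.2 hx
    simp only at this ⊢
    rw [this]
  rw [hcongr]
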